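-- pv_equiv track=rewrite | github.com/kaelthasmanu/SquidStats | services/squid/user_restrictions_service.py | _filter_acl_lines
-- ===== SOURCE A (Python) =====
-- def _filter_acl_lines(lines: list[str], acl_name: str, comment: str) -> list[str]:
--     """Strip the ACL line and its preceding comment from *lines*."""
--     result = []
--     skip_comment = False
--     for line in lines:
--         stripped = line.strip()
--         if stripped == comment:
--             skip_comment = True
--             continue
--         if skip_comment and stripped.startswith(f"acl {acl_name} src"):
--             skip_comment = False
--             continue
--         skip_comment = False
--         result.append(line)
--     return result
-- ===== SOURCE B (Python) =====
-- def _filter_acl_lines(lines: list[str], acl_name: str, comment: str) -> list[str]: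
--     """Strip the ACL line and its preceding comment from *lines*."""
--     pre = f"acl {acl_name} src"
--     stripped = [line.strip() for line in lines]
--     prev = [None] + stripped  # previous line's stripped form (None before the first line)
--     return [
--         line
--         for line, s, p in zip(lines, stripped, prev)
--         if s != comment and not (p == comment and s.startswith(pre))
--     ]
-- ===== Notes on version B (the rewrite author's own statement) =====
-- stated objective: alternative
-- what changed: Replaces A's single stateful loop with a skip_comment flag by a two-pass decomposition: precompute the stripped lines, then filter each line by looking at its own and the previous line's stripped form via zip.
import Mathlib
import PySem

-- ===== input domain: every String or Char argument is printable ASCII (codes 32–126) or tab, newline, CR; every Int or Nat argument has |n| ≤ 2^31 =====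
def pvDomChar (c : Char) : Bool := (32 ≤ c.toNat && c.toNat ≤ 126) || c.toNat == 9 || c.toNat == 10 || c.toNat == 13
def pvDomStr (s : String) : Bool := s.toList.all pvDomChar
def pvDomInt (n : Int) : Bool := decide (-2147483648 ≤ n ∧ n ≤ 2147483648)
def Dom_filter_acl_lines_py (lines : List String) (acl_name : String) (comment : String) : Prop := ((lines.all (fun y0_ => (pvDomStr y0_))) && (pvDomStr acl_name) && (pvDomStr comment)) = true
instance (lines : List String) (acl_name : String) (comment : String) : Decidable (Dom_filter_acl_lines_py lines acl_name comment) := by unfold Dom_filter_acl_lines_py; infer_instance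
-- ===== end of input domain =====

-- B replaces A's forward skip_comment flag with a zip-with-previous-stripped-line filter; objective: alternative decomposition, same O(n) cost.

-- ===== PORT A =====
-- A: one loop with accumulator (result, skip_comment); 'continue' branches in source order.
def filter_acl_lines_py (lines : List String) (acl_name : String) (comment : String) : List String :=
  (lines.foldl (fun (st : List String × Bool) line =>
      let stripped := PySem.Str.strip line
      if stripped == comment then (st.1, true)
      else if st.2 && PySem.Str.startswith stripped ("acl " ++ acl_name ++ " src") then (st.1, false)
      else (st.1 ++ [line], false))
    ([], false)).1

-- ===== PORT B =====
-- B: stripped list, zip each line with its own stripped form and the previous one (none before the first), filter.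
def filter_acl_lines_py_alt (lines : List String) (acl_name : String) (comment : String) : List String :=
  let pre := "acl " ++ acl_name ++ " src"
  let stripped := lines.map PySem.Str.strip
  let prev : List (Option String) := none :: stripped.map some
  (lines.zip (stripped.zip prev)).filterMap (fun lsp =>
    if !(lsp.2.1 == comment) && !((lsp.2.2 == some comment) && PySem.Str.startswith lsp.2.1 pre)
    then some lsp.1 else none)

-- ===== PRECONDITION & SPEC =====
def Spec_filter_acl_lines_py (lines : List String) (acl_name : String) (comment : String) (out : List String) : Prop := out = filter_acl_lines_py_alt lines acl_name comment
instance (lines : List String) (acl_name : String) (comment : String) (out : List String) : Decidable (Spec_filter_acl_lines_py lines acl_name comment out) := by unfold Spec_filter_acl_lines_py; infer_instance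

-- ===== CLAIM (what is proved, stated in full; the proofs are below) =====
def Claim_equal_filter_acl_lines_py : Prop := ∀ (lines : List String) (acl_name : String) (comment : String), Dom_filter_acl_lines_py lines acl_name comment → Spec_filter_acl_lines_py lines acl_name comment (filter_acl_lines_py lines acl_name comment)

-- ===== LEMMAS AND PROOFS =====

-- Common recursive description of the filtered output, parametrised by the skip flag.
def goFilter (acl_name comment : String) : Bool → List String → List String
  | _, [] => []
  | skip, l :: ls =>
    let s := PySem.Str.strip l
    if s == comment then goFilter acl_name comment true ls
    else if skip && PySem.Str.startswith s ("acl " ++ acl_name ++ " src") then goFilter acl_name comment false ls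
    else l :: goFilter acl_name comment false ls

theorem foldlA_eq_goFilter (acl_name comment : String) (ls : List String) (acc : List String) (skip : Bool) :
    (ls.foldl (fun (st : List String × Bool) line =>
      let stripped := PySem.Str.strip line
      if stripped == comment then (st.1, true)
      else if st.2 && PySem.Str.startswith stripped ("acl " ++ acl_name ++ " src") then (st.1, false)
      else (st.1 ++ [line], false))
    (acc, skip)).1 = acc ++ goFilter acl_name comment skip ls := by
  induction ls generalizing acc skip with
  | nil => simp [goFilter]
  | cons l ls ih =>
    simp only [List.foldl_cons, goFilter]
    cases h1 : (PySem.Str.strip l == comment) with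
    | true => simp only [if_true, ih]
    | false =>
      cases h2 : (skip && PySem.Str.startswith (PySem.Str.strip l) ("acl " ++ acl_name ++ " src")) with
      | true => simp only [if_true, if_false, Bool.false_eq_true, ih]
      | false => simp only [if_false, Bool.false_eq_true, ih, List.append_assoc,
          List.singleton_append]

theorem zipB_eq_goFilter (acl_name comment : String) (ls : List String) (p : Option String) :
    (ls.zip ((ls.map PySem.Str.strip).zip (p :: (ls.map PySem.Str.strip).map some))).filterMap (fun lsp =>
      if !(lsp.2.1 == comment) && !((lsp.2.2 == some comment) && PySem.Str.startswith lsp.2.1 ("acl " ++ acl_name ++ " src"))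
      then some lsp.1 else none)
    = goFilter acl_name comment (p == some comment) ls := by
  induction ls generalizing p with
  | nil => simp [goFilter]
  | cons l ls ih =>
    simp only [List.map_cons, List.zip_cons_cons, List.filterMap_cons, goFilter]
    have hp : (some (PySem.Str.strip l) == some comment) = (PySem.Str.strip l == comment) := by
      cases h : (PySem.Str.strip l == comment) <;> simp_all
    cases h1 : (PySem.Str.strip l == comment) with
    | true =>
      simp only [h1, hp, Bool.not_true, Bool.false_and,
        Bool.false_eq_true, if_false, if_true, ih]
    | false =>
      cases h2 : ((p == some comment) && PySem.Str.startswith (PySem.Str.strip l) ("acl " ++ acl_name ++ " src")) with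
      | true =>
        simp only [h1, hp, Bool.not_true, Bool.not_false, Bool.and_false,
          Bool.false_eq_true, if_false, if_true, ih]
      | false =>
        simp only [h1, hp, Bool.not_false, Bool.and_true,
          Bool.false_eq_true, if_false, if_true, ih]

-- ===== VERDICT (by name: the statement is the Claim_ definition above) =====
theorem filter_acl_lines_py_spec : Claim_equal_filter_acl_lines_py := by
  intro lines acl_name comment _
  unfold Spec_filter_acl_lines_py filter_acl_lines_py filter_acl_lines_py_alt
  rw [foldlA_eq_goFilter, zipB_eq_goFilter]
  simp
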